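-- pv_equiv track=rewrite | github.com/isHarryh/Lanqiao-Exercises | src/43735/Main.py | calc_relation_index
-- ===== SOURCE A (Python) =====
-- def calc_relation_index(text: str, name1: str, name2: str, k: int):
--     indexes_of_name1 = []
--     indexes_of_name2 = []
--     groups = (
--         (name1, indexes_of_name1, indexes_of_name2),
--         (name2, indexes_of_name2, indexes_of_name1)
--     )
--
--     total = 0
--     word = ""
--     for i, c in enumerate(text + "\0"):
--         if c.isalpha():
--             word += c
--         elif word:
--             threshold = i - k - len(word)
--             for this_name, this_indexes, other_indexes in groups:
--                 if word == this_name: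
--                     this_indexes.append(i)
--                     while other_indexes and other_indexes[0] < threshold:
--                         other_indexes.pop(0)
--                     total += len(other_indexes)
--                     break
--             word = ""
--     return total
-- ===== SOURCE B (Python) =====
-- def calc_relation_index(text: str, name1: str, name2: str, k: int):
--     # Phase 1: tokenize the text into (end_index, word) pairs.
--     words = []
--     word = ""
--     for i, c in enumerate(text + "\0"):
--         if c.isalpha():
--             word += c
--         else:
--             if word:
--                 words.append((i, word))
--             word = ""
--     # Phase 2: keep only occurrences of name1/name2 (first match wins).
--     occ = []
--     for i, w in words:
--         if w == name1:
--             occ.append((i, 0))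
--         elif w == name2:
--             occ.append((i, 1))
--     idx = ([i for i, nid in occ if nid == 0], [i for i, nid in occ if nid == 1])
--     lens = (len(name1), len(name2))
--     # Phase 3: for each occurrence, count opposite-name occurrences in its window.
--     total = 0
--     for i, nid in occ:
--         lo = i - k - lens[nid]
--         total += sum(1 for j in idx[1 - nid] if lo <= j and j < i)
--     return total
-- ===== Notes on version B (the rewrite author's own statement) =====
-- stated objective: alternative
-- what changed: Replaces A's single online scan with mutable sliding-window queues (front-pops pruning the opposite name's queue at each match) by a three-phase pipeline: tokenize the text into (end_index, word) pairs, select the name occurrences (first name wins on ties), then count each occurrence's window partners by filtering the full opposite index list.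
import Mathlib
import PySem

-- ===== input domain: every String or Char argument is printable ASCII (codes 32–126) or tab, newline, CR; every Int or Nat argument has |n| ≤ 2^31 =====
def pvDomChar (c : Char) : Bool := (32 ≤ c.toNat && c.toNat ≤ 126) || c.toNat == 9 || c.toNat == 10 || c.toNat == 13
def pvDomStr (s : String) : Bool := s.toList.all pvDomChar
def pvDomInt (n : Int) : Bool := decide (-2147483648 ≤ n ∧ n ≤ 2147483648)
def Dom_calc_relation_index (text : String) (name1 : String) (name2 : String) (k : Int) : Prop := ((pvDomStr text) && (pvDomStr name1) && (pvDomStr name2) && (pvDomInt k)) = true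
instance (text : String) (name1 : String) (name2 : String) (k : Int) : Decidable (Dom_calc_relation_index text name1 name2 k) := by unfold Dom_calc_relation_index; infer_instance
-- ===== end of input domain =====

-- B replaces A's online scan with pruned sliding-window queues by a tokenize / select / count-by-filtering pipeline (alternative decomposition, same return value).


-- ===== PORT A =====
-- loop body of A's single for-loop; state = (indexes_of_name1, indexes_of_name2, total, word, i)
def pvStepA (n1 n2 : List Char) (k : Int)
    (st : List Int × List Int × Int × List Char × Int) (c : Char) :
    List Int × List Int × Int × List Char × Int :=
  match st with
  | (idx1, idx2, total, word, i) =>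
    if PySem.Chars.isalpha c then (idx1, idx2, total, word ++ [c], i + 1)
    else if word ≠ [] then
      let threshold := i - k - (word.length : Int)
      if word = n1 then
        -- while other_indexes and other_indexes[0] < threshold: other_indexes.pop(0)
        let idx2' := idx2.dropWhile (fun j => decide (j < threshold))
        (idx1 ++ [i], idx2', total + (idx2'.length : Int), [], i + 1)
      else if word = n2 then
        let idx1' := idx1.dropWhile (fun j => decide (j < threshold))
        (idx1', idx2 ++ [i], total + (idx1'.length : Int), [], i + 1)
      else (idx1, idx2, total, [], i + 1)
    else (idx1, idx2, total, [], i + 1)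

def calc_relation_index (text : String) (name1 : String) (name2 : String) (k : Int) : Int :=
  ((text.toList ++ [Char.ofNat 0]).foldl (pvStepA name1.toList name2.toList k)
      ([], [], 0, [], 0)).2.2.1

-- ===== PORT B =====
-- Phase 1 of B: tokenize into (end_index, word) pairs
def pvToks (cs : List Char) (word : List Char) (i : Int) : List (Int × List Char) :=
  match cs with
  | [] => []
  | c :: rest =>
    if PySem.Chars.isalpha c then pvToks rest (word ++ [c]) (i + 1)
    else if word ≠ [] then (i, word) :: pvToks rest [] (i + 1)
    else pvToks rest [] (i + 1)

def calc_relation_index_alt (text : String) (name1 : String) (name2 : String) (k : Int) : Int :=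
  let n1 := name1.toList
  let n2 := name2.toList
  let words := pvToks (text.toList ++ [Char.ofNat 0]) [] 0
  let occ : List (Int × Int) := words.filterMap (fun iw =>
    if iw.2 = n1 then some (iw.1, (0 : Int))
    else if iw.2 = n2 then some (iw.1, (1 : Int)) else none)
  let idx1 := (occ.filter (fun p => p.2 == 0)).map (fun p => p.1)
  let idx2 := (occ.filter (fun p => p.2 == 1)).map (fun p => p.1)
  occ.foldl (fun total p =>
    let lo := p.1 - k - (if p.2 == 0 then (n1.length : Int) else (n2.length : Int))
    total + (((if p.2 == 0 then idx2 else idx1).filter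
        (fun j => decide (lo ≤ j) && decide (j < p.1))).length : Int)) 0

-- ===== PRECONDITION & SPEC =====
def Spec_calc_relation_index (text : String) (name1 : String) (name2 : String) (k : Int) (out : Int) : Prop := out = calc_relation_index_alt text name1 name2 k
instance (text : String) (name1 : String) (name2 : String) (k : Int) (out : Int) : Decidable (Spec_calc_relation_index text name1 name2 k out) := by unfold Spec_calc_relation_index; infer_instance

-- ===== CLAIM (what is proved, stated in full; the proofs are below) =====
def Claim_equal_calc_relation_index : Prop := ∀ (text : String) (name1 : String) (name2 : String) (k : Int), Dom_calc_relation_index text name1 name2 k → Spec_calc_relation_index text name1 name2 k (calc_relation_index text name1 name2 k)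

-- ===== LEMMAS AND PROOFS =====

-- proof-side abbreviations for the pieces of B
def pvOccs (n1 n2 : List Char) (ws : List (Int × List Char)) : List (Int × Int) :=
  ws.filterMap (fun iw =>
    if iw.2 = n1 then some (iw.1, (0 : Int))
    else if iw.2 = n2 then some (iw.1, (1 : Int)) else none)

def pvH (nid : Int) (os : List (Int × Int)) : List Int :=
  (os.filter (fun p => p.2 == nid)).map (fun p => p.1)

def pvCnt (lo i : Int) (js : List Int) : Int :=
  ((js.filter (fun j => decide (lo ≤ j) && decide (j < i))).length : Int)

def pvF (n1 n2 : List Char) (k : Int) (F1 F2 : List Int) (p : Int × Int) : Int :=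
  pvCnt (p.1 - k - (if p.2 == 0 then (n1.length : Int) else (n2.length : Int))) p.1
        (if p.2 == 0 then F2 else F1)

-- every token produced from position i ends at or after i
lemma pvToks_bound : ∀ (cs w : List Char) (i : Int) (q : Int × List Char),
    q ∈ pvToks cs w i → i ≤ q.1 := by
  intro cs
  induction cs with
  | nil => intro w i q hq; simp [pvToks] at hq
  | cons c rest ih =>
    intro w i q hq
    simp only [pvToks] at hq
    split at hq
    · have := ih _ _ _ hq; omega
    · split at hq
      · rcases List.mem_cons.mp hq with h | h
        · subst h; omega
        · have := ih _ _ _ h; omega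
      · have := ih _ _ _ hq; omega

lemma mem_pvH_toks_bound (n1 n2 : List Char) (nid : Int) :
    ∀ (cs w : List Char) (i : Int) (j : Int),
    j ∈ pvH nid (pvOccs n1 n2 (pvToks cs w i)) → i ≤ j := by
  intro cs w i j hj
  simp only [pvH, pvOccs, List.mem_map, List.mem_filter, List.mem_filterMap] at hj
  obtain ⟨p, ⟨⟨iw, hiw, hsome⟩, _⟩, hp1⟩ := hj
  have h1 : p.1 = iw.1 := by
    by_cases h : iw.2 = n1
    · rw [if_pos h] at hsome
      exact (congrArg Prod.fst (Option.some.inj hsome)).symm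
    · rw [if_neg h] at hsome
      by_cases h2 : iw.2 = n2
      · rw [if_pos h2] at hsome
        exact (congrArg Prod.fst (Option.some.inj hsome)).symm
      · rw [if_neg h2] at hsome; cases hsome
  have := pvToks_bound cs w i iw hiw
  omega

-- on a strictly sorted list, popping the front while below θ is filtering to ≥ θ
lemma pvDropWhile_sorted (θ : Int) :
    ∀ (l : List Int), l.Pairwise (· < ·) →
    l.dropWhile (fun j => decide (j < θ)) = l.filter (fun j => decide (θ ≤ j)) := by
  intro l hl
  induction l with
  | nil => simp
  | cons a l ih =>
    have htail := (List.pairwise_cons.mp hl).2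
    have hall := (List.pairwise_cons.mp hl).1
    by_cases ha : a < θ
    · simp only [List.dropWhile_cons, List.filter_cons]
      simp only [ha, decide_true, if_true]
      have : ¬ θ ≤ a := by omega
      simp [this, ih htail]
    · simp only [List.dropWhile_cons, List.filter_cons]
      have h1 : θ ≤ a := by omega
      simp only [ha, decide_false, Bool.false_eq_true, if_false, h1, decide_true, if_true]
      have : l.filter (fun j => decide (θ ≤ j)) = l := by
        apply List.filter_eq_self.mpr
        intro x hx
        have := hall x hx
        simp; omega
      rw [this]

-- the pruned queue (a suffix of the full index list p, whose removed prefix is below θ) filtered live equals the filter of p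
lemma pvQueue_eq (θ : Int) (p : List Int) (d : Nat)
    (htk : ∀ e ∈ p.take d, e < θ) (hs : p.Pairwise (· < ·)) :
    (p.drop d).dropWhile (fun j => decide (j < θ)) = p.filter (fun j => decide (θ ≤ j)) := by
  have h0 : (p.take d).dropWhile (fun j => decide (j < θ)) = [] := by
    rw [List.dropWhile_eq_nil_iff]
    intro e he; simpa using htk e he
  have h1 : (p.take d ++ p.drop d).dropWhile (fun j => decide (j < θ))
      = (p.drop d).dropWhile (fun j => decide (j < θ)) := by
    rw [List.dropWhile_append, h0]; simp
  rw [List.take_append_drop] at h1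
  rw [← h1, pvDropWhile_sorted θ p hs]

lemma pvFilter_as_drop (θ : Int) (p : List Int) :
    p.drop ((p.takeWhile (fun j => decide (j < θ))).length)
      = p.dropWhile (fun j => decide (j < θ)) := by
  induction p with
  | nil => simp
  | cons a l ih =>
    by_cases h : a < θ <;> simp [h, ih]

lemma pvTake_as_takeWhile (θ : Int) (p : List Int) :
    p.take ((p.takeWhile (fun j => decide (j < θ))).length)
      = p.takeWhile (fun j => decide (j < θ)) := by
  induction p with
  | nil => simp
  | cons a l ih =>
    by_cases h : a < θ <;> simp [h, ih]

-- the window count over the full list: future occurrences are beyond i, past ones are all below i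
lemma pvCount_eq (i k wl : Int) (p fut : List Int) (hwl : 1 ≤ wl)
    (hb : ∀ e ∈ p, e < i - wl) (hfut : ∀ j ∈ fut, i + 1 ≤ j) :
    pvCnt (i - k - wl) i (p ++ fut)
      = ((p.filter (fun j => decide (i - k - wl ≤ j))).length : Int) := by
  unfold pvCnt
  rw [List.filter_append]
  have h2 : fut.filter (fun j => decide (i - k - wl ≤ j) && decide (j < i)) = [] := by
    rw [List.filter_eq_nil_iff]
    intro j hj
    have := hfut j hj
    simp; omega
  have h1 : p.filter (fun j => decide (i - k - wl ≤ j) && decide (j < i))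
      = p.filter (fun j => decide (i - k - wl ≤ j)) := by
    apply List.filter_congr
    intro j hj
    have := hb j hj
    have : j < i := by omega
    simp [this]
  rw [h1, h2, List.append_nil]

lemma pvMainA (n1 n2 : List Char) (k : Int) :
    ∀ (cs w : List Char) (i : Int) (p1 p2 : List Int) (d1 d2 : Nat) (total : Int),
    d1 ≤ p1.length → d2 ≤ p2.length →
    (∀ e ∈ p1.take d1, e < i - w.length - k) →
    (∀ e ∈ p2.take d2, e < i - w.length - k) →
    (∀ e ∈ p1, e < i - w.length) →
    (∀ e ∈ p2, e < i - w.length) →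
    p1.Pairwise (· < ·) → p2.Pairwise (· < ·) →
    (cs.foldl (pvStepA n1 n2 k) (p1.drop d1, p2.drop d2, total, w, i)).2.2.1
      = total + ((pvOccs n1 n2 (pvToks cs w i)).map (pvF n1 n2 k
          (p1 ++ pvH 0 (pvOccs n1 n2 (pvToks cs w i)))
          (p2 ++ pvH 1 (pvOccs n1 n2 (pvToks cs w i))))).sum := by
  intro cs
  induction cs with
  | nil =>
    intro w i p1 p2 d1 d2 total _ _ _ _ _ _ _ _
    simp [pvToks, pvOccs]
  | cons c rest ih =>
    intro w i p1 p2 d1 d2 total hd1 hd2 ht1 ht2 hb1 hb2 hs1 hs2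
    rw [List.foldl_cons]
    by_cases hal : PySem.Chars.isalpha c = true
    · -- alphabetic: extend the word
      have hstep : pvStepA n1 n2 k (p1.drop d1, p2.drop d2, total, w, i) c
          = (p1.drop d1, p2.drop d2, total, w ++ [c], i + 1) := by
        simp [pvStepA, hal]
      have htoks : pvToks (c :: rest) w i = pvToks rest (w ++ [c]) (i + 1) := by
        simp [pvToks, hal]
      rw [hstep, htoks]
      apply ih (w ++ [c]) (i + 1) p1 p2 d1 d2 total hd1 hd2 ?_ ?_ ?_ ?_ hs1 hs2
      · intro e he; have := ht1 e he; simp only [List.length_append, List.length_cons,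
          List.length_nil] at *; push_cast at *; omega
      · intro e he; have := ht2 e he; simp only [List.length_append, List.length_cons,
          List.length_nil] at *; push_cast at *; omega
      · intro e he; have := hb1 e he; simp only [List.length_append, List.length_cons,
          List.length_nil] at *; push_cast at *; omega
      · intro e he; have := hb2 e he; simp only [List.length_append, List.length_cons,
          List.length_nil] at *; push_cast at *; omega
    · by_cases hw : w = []
      · -- boundary, no pending word
        subst hw
        have hstep : pvStepA n1 n2 k (p1.drop d1, p2.drop d2, total, [], i) c
            = (p1.drop d1, p2.drop d2, total, [], i + 1) := by
          simp [pvStepA, hal]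
        have htoks : pvToks (c :: rest) [] i = pvToks rest [] (i + 1) := by
          simp [pvToks, hal]
        rw [hstep, htoks]
        apply ih [] (i + 1) p1 p2 d1 d2 total hd1 hd2 ?_ ?_ ?_ ?_ hs1 hs2
        · intro e he; have := ht1 e he; simp at *; omega
        · intro e he; have := ht2 e he; simp at *; omega
        · intro e he; have := hb1 e he; simp at *; omega
        · intro e he; have := hb2 e he; simp at *; omega
      · -- boundary with a completed word w
        have hwl : 1 ≤ (w.length : Int) := by
          cases w with
          | nil => exact absurd rfl hw
          | cons a l => simp
        have htoks : pvToks (c :: rest) w i = (i, w) :: pvToks rest [] (i + 1) := by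
          simp [pvToks, hal, hw]
        by_cases hn1 : w = n1
        · -- occurrence of name1
          have hstep : pvStepA n1 n2 k (p1.drop d1, p2.drop d2, total, w, i) c
              = (p1.drop d1 ++ [i],
                 (p2.drop d2).dropWhile (fun j => decide (j < i - k - (w.length : Int))),
                 total + (((p2.drop d2).dropWhile (fun j => decide (j < i - k - (w.length : Int)))).length : Int),
                 [], i + 1) := by
            simp only [pvStepA]
            rw [if_neg hal, if_pos hw, if_pos hn1]
          have hq2 : (p2.drop d2).dropWhile (fun j => decide (j < i - k - (w.length : Int)))
              = p2.filter (fun j => decide (i - k - (w.length : Int) ≤ j)) := by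
            apply pvQueue_eq _ _ _ _ hs2
            intro e he; have := ht2 e he; omega
          have hoccs : pvOccs n1 n2 (pvToks (c :: rest) w i)
              = (i, 0) :: pvOccs n1 n2 (pvToks rest [] (i + 1)) := by
            rw [htoks]; simp [pvOccs, hn1]
          have hH0 : pvH 0 (pvOccs n1 n2 (pvToks (c :: rest) w i))
              = i :: pvH 0 (pvOccs n1 n2 (pvToks rest [] (i + 1))) := by
            rw [hoccs]; simp [pvH]
          have hH1 : pvH 1 (pvOccs n1 n2 (pvToks (c :: rest) w i))
              = pvH 1 (pvOccs n1 n2 (pvToks rest [] (i + 1))) := by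
            rw [hoccs]; simp [pvH]
          rw [hstep, hq2]
          set θ := i - k - (w.length : Int) with hθ
          set d2' := (p2.takeWhile (fun j => decide (j < θ))).length with hd2'
          have hdropq : p2.drop d2' = p2.filter (fun j => decide (θ ≤ j)) := by
            rw [hd2', pvFilter_as_drop, ← hq2, hq2]
            rw [pvDropWhile_sorted θ p2 hs2]
          have hdp1 : p1.drop d1 ++ [i] = (p1 ++ [i]).drop d1 :=
            (List.drop_append_of_le_length hd1).symm
          rw [hdp1, ← hdropq]
          have hih := ih [] (i + 1) (p1 ++ [i]) p2 d1 d2'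
            (total + ((p2.filter (fun j => decide (θ ≤ j))).length : Int))
            (by simp only [List.length_append, List.length_cons, List.length_nil]; omega)
            ((List.takeWhile_sublist _).length_le)
            (by intro e he
                rw [List.take_append_of_le_length hd1] at he
                have := ht1 e he; simp at *; omega)
            (by intro e he
                rw [hd2', pvTake_as_takeWhile] at he
                have := List.mem_takeWhile_imp he
                simp at *; omega)
            (by intro e he
                rcases List.mem_append.mp he with h | h
                · have := hb1 e h; simp at *; omega
                · simp at h; simp; omega)
            (by intro e he; have := hb2 e he; simp at *; omega)
            (by rw [List.pairwise_append]
                refine ⟨hs1, by simp, ?_⟩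
                intro a ha b hb; simp at hb; subst hb
                have := hb1 a ha; omega)
            hs2
          rw [← hdropq] at hih
          rw [hih]
          rw [hoccs, hH0, hH1] at *
          rw [List.map_cons, List.sum_cons]
          have hhead : pvF n1 n2 k
              (p1 ++ i :: pvH 0 (pvOccs n1 n2 (pvToks rest [] (i + 1))))
              (p2 ++ pvH 1 (pvOccs n1 n2 (pvToks rest [] (i + 1)))) (i, 0)
              = ((p2.filter (fun j => decide (θ ≤ j))).length : Int) := by
            unfold pvF
            simp only [BEq.rfl, if_true]
            have hlen : (n1.length : Int) = (w.length : Int) := by rw [hn1]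
            rw [hlen]
            apply pvCount_eq i k _ _ _ hwl
            · intro e he; have := hb2 e he; omega
            · intro j hj; exact mem_pvH_toks_bound n1 n2 1 rest [] (i+1) j hj
          rw [hhead]
          have hassoc : (p1 ++ [i]) ++ pvH 0 (pvOccs n1 n2 (pvToks rest [] (i + 1)))
              = p1 ++ i :: pvH 0 (pvOccs n1 n2 (pvToks rest [] (i + 1))) := by
            simp
          rw [hassoc, hdropq]
          ring
        · by_cases hn2 : w = n2
          · -- occurrence of name2
            have hstep : pvStepA n1 n2 k (p1.drop d1, p2.drop d2, total, w, i) c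
                = ((p1.drop d1).dropWhile (fun j => decide (j < i - k - (w.length : Int))),
                   p2.drop d2 ++ [i],
                   total + (((p1.drop d1).dropWhile (fun j => decide (j < i - k - (w.length : Int)))).length : Int),
                   [], i + 1) := by
              simp only [pvStepA]
              rw [if_neg hal, if_pos hw, if_neg hn1, if_pos hn2]
            have hq1 : (p1.drop d1).dropWhile (fun j => decide (j < i - k - (w.length : Int)))
                = p1.filter (fun j => decide (i - k - (w.length : Int) ≤ j)) := by
              apply pvQueue_eq _ _ _ _ hs1
              intro e he; have := ht1 e he; omega
            have hoccs : pvOccs n1 n2 (pvToks (c :: rest) w i)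
                = (i, 1) :: pvOccs n1 n2 (pvToks rest [] (i + 1)) := by
              rw [htoks]
              unfold pvOccs
              rw [List.filterMap_cons, if_neg hn1, if_pos hn2]
            have hH0 : pvH 0 (pvOccs n1 n2 (pvToks (c :: rest) w i))
                = pvH 0 (pvOccs n1 n2 (pvToks rest [] (i + 1))) := by
              rw [hoccs]; simp [pvH]
            have hH1 : pvH 1 (pvOccs n1 n2 (pvToks (c :: rest) w i))
                = i :: pvH 1 (pvOccs n1 n2 (pvToks rest [] (i + 1))) := by
              rw [hoccs]; simp [pvH]
            rw [hstep, hq1]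
            set θ := i - k - (w.length : Int) with hθ
            set d1' := (p1.takeWhile (fun j => decide (j < θ))).length with hd1'
            have hdropq : p1.drop d1' = p1.filter (fun j => decide (θ ≤ j)) := by
              rw [hd1', pvFilter_as_drop]
              rw [pvDropWhile_sorted θ p1 hs1]
            have hdp2 : p2.drop d2 ++ [i] = (p2 ++ [i]).drop d2 :=
              (List.drop_append_of_le_length hd2).symm
            rw [hdp2, ← hdropq]
            have hih := ih [] (i + 1) p1 (p2 ++ [i]) d1' d2
              (total + ((p1.filter (fun j => decide (θ ≤ j))).length : Int))
              ((List.takeWhile_sublist _).length_le)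
              (by simp only [List.length_append, List.length_cons, List.length_nil]; omega)
              (by intro e he
                  rw [hd1', pvTake_as_takeWhile] at he
                  have := List.mem_takeWhile_imp he
                  simp at *; omega)
              (by intro e he
                  rw [List.take_append_of_le_length hd2] at he
                  have := ht2 e he; simp at *; omega)
              (by intro e he; have := hb1 e he; simp at *; omega)
              (by intro e he
                  rcases List.mem_append.mp he with h | h
                  · have := hb2 e h; simp at *; omega
                  · simp at h; simp; omega)
              hs1
              (by rw [List.pairwise_append]
                  refine ⟨hs2, by simp, ?_⟩
                  intro a ha b hb; simp at hb; subst hb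
                  have := hb2 a ha; omega)
            rw [← hdropq] at hih
            rw [hih]
            rw [hoccs, hH0, hH1] at *
            rw [List.map_cons, List.sum_cons]
            have hhead : pvF n1 n2 k
                (p1 ++ pvH 0 (pvOccs n1 n2 (pvToks rest [] (i + 1))))
                (p2 ++ i :: pvH 1 (pvOccs n1 n2 (pvToks rest [] (i + 1)))) (i, 1)
                = ((p1.filter (fun j => decide (θ ≤ j))).length : Int) := by
              unfold pvF
              have h10 : (((i, (1:Int)).2) == 0) = false := by simp
              simp only [h10, Bool.false_eq_true, if_false]
              have hlen : (n2.length : Int) = (w.length : Int) := by rw [hn2]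
              rw [hlen]
              apply pvCount_eq i k _ _ _ hwl
              · intro e he; have := hb1 e he; omega
              · intro j hj; exact mem_pvH_toks_bound n1 n2 0 rest [] (i+1) j hj
            rw [hhead]
            have hassoc : (p2 ++ [i]) ++ pvH 1 (pvOccs n1 n2 (pvToks rest [] (i + 1)))
                = p2 ++ i :: pvH 1 (pvOccs n1 n2 (pvToks rest [] (i + 1))) := by
              simp
            rw [hassoc, hdropq]
            ring
          · -- a word matching neither name
            have hstep : pvStepA n1 n2 k (p1.drop d1, p2.drop d2, total, w, i) c
                = (p1.drop d1, p2.drop d2, total, [], i + 1) := by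
              simp only [pvStepA]
              rw [if_neg hal, if_pos hw, if_neg hn1, if_neg hn2]
            have hoccs : pvOccs n1 n2 (pvToks (c :: rest) w i)
                = pvOccs n1 n2 (pvToks rest [] (i + 1)) := by
              rw [htoks]; simp [pvOccs, hn1, hn2]
            rw [hstep, hoccs]
            apply ih [] (i + 1) p1 p2 d1 d2 total hd1 hd2 ?_ ?_ ?_ ?_ hs1 hs2
            · intro e he; have := ht1 e he; simp at *; omega
            · intro e he; have := ht2 e he; simp at *; omega
            · intro e he; have := hb1 e he; simp at *; omega
            · intro e he; have := hb2 e he; simp at *; omega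

theorem calc_relation_index_spec : Claim_equal_calc_relation_index := by
  intro text name1 name2 k _
  unfold Spec_calc_relation_index
  have hA := pvMainA name1.toList name2.toList k (text.toList ++ [Char.ofNat 0]) [] 0 [] [] 0 0 0
    (by simp) (by simp) (by simp) (by simp) (by simp) (by simp) (by simp) (by simp)
  have hB : calc_relation_index_alt text name1 name2 k
      = 0 + ((pvOccs name1.toList name2.toList (pvToks (text.toList ++ [Char.ofNat 0]) [] 0)).map
          (pvF name1.toList name2.toList k
            (pvH 0 (pvOccs name1.toList name2.toList (pvToks (text.toList ++ [Char.ofNat 0]) [] 0)))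
            (pvH 1 (pvOccs name1.toList name2.toList (pvToks (text.toList ++ [Char.ofNat 0]) [] 0))))).sum := by
    unfold calc_relation_index_alt
    exact PySem.List.foldl_add _ (pvF _ _ _ _ _) 0
  unfold calc_relation_index
  rw [hB]
  simpa using hA
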